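-- pv_equiv track=rewrite | github.com/VoidArchive/Code-War-Kata-Traning | Code War/Is_my_friends_cheating.py | remov_nb_2
-- ===== SOURCE A (Python) =====
-- def remov_nb_2(n):
--     result = []
--     sequence_sum = n * (n + 1) // 2
--     for x in range(1, n + 1):
--         y = (sequence_sum - x) // (x + 1)
--         if y <= n and x * y == (sequence_sum - x - y):
--             result.append((x, y))
--     return result
-- ===== SOURCE B (Python) =====
-- def remov_nb_2(n):
--     if n < 1:
--         return []
--     total = n * (n + 1) // 2 + 1
--     cands = set()
--     d = 1
--     while d * d <= total:
--         if total % d == 0: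
--             for f in (d, total // d):
--                 x = f - 1
--                 y = total // f - 1
--                 if 1 <= x <= n and y <= n:
--                     cands.add((x, y))
--         d += 1
--     return sorted(cands, key=lambda p: p[0])
-- ===== Notes on version B (the rewrite author's own statement) =====
-- stated objective: faster
-- what changed: A scans every x from one to n and tests the remainder equation; B enumerates the divisors of the incremented triangular sum only up to its square root, derives candidate pairs from each factor pair, collects them in a set and sorts by x.
import Mathlib
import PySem

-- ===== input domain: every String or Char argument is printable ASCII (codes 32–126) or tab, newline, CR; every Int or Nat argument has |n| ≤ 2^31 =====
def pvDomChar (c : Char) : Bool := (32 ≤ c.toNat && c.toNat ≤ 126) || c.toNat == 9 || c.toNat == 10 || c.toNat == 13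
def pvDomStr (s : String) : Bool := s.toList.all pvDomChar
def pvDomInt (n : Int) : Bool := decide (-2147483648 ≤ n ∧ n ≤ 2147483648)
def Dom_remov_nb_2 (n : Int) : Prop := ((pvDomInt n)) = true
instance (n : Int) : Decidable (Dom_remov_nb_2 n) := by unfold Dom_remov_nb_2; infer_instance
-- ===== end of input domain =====

-- B replaces A's scan of every x in 1..n by enumerating the divisors d of T = n*(n+1)//2 + 1
-- up to sqrt(T) (each factor f of T yields the candidate x = f-1), collecting the hits in a
-- set and sorting them by x.

-- ===== PORT A =====
def remov_nb_2 (n : Int) : List (Int × Int) :=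
  let sequence_sum := PySem.Int.floordiv (n * (n + 1)) 2
  (PySem.List.pyRange 1 (n + 1) 1).foldl (fun result x =>
    let y := PySem.Int.floordiv (sequence_sum - x) (x + 1)
    if y ≤ n ∧ x * y = sequence_sum - x - y then result ++ [(x, y)] else result) []

-- ===== PORT B =====
-- the 'for f in (d, total // d)' body of Source B's while loop
def pvStep (n total : Int) (s : PySem.Set (Int × Int)) (f : Int) : PySem.Set (Int × Int) :=
  let x := f - 1
  let y := PySem.Int.floordiv total f - 1
  if 1 ≤ x ∧ x ≤ n ∧ y ≤ n then PySem.Set.add s (x, y) else s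

-- Source B's while loop; 'hd : 1 ≤ d' is only a totality witness (d starts at 1 and only grows)
def pvLoop (n total : Int) (d : Int) (hd : 1 ≤ d) (cands : PySem.Set (Int × Int)) :
    PySem.Set (Int × Int) :=
  if h : d * d ≤ total then
    pvLoop n total (d + 1) (by omega)
      (if PySem.Int.mod total d = 0 then
        [d, PySem.Int.floordiv total d].foldl (pvStep n total) cands
      else cands)
  else cands
termination_by (total + 1 - d).toNat
decreasing_by
  have hle : d ≤ total := le_trans (le_mul_of_one_le_left (by omega) hd) h
  omega

def remov_nb_2_alt (n : Int) : List (Int × Int) :=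
  if n < 1 then []
  else
    let total := PySem.Int.floordiv (n * (n + 1)) 2 + 1
    let cands := pvLoop n total 1 (le_refl 1) PySem.Set.empty
    PySem.List.sorted cands (fun p => p.1) false

-- ===== PRECONDITION & SPEC =====
def Spec_remov_nb_2 (n : Int) (out : List (Int × Int)) : Prop := out = remov_nb_2_alt n
instance (n : Int) (out : List (Int × Int)) : Decidable (Spec_remov_nb_2 n out) := by unfold Spec_remov_nb_2; infer_instance

-- ===== CLAIM (what is proved, stated in full; the proofs are below) =====
def Claim_equal_remov_nb_2 : Prop := ∀ (n : Int), Dom_remov_nb_2 n → Spec_remov_nb_2 n (remov_nb_2 n)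

-- ===== LEMMAS AND PROOFS =====

-- A's loop, parameterized by the precomputed triangular sum S
def Afold (n S : Int) : List (Int × Int) :=
  (PySem.List.pyRange 1 (n + 1) 1).foldl (fun result x =>
    let y := PySem.Int.floordiv (S - x) (x + 1)
    if y ≤ n ∧ x * y = S - x - y then result ++ [(x, y)] else result) []

lemma remov_nb_2_eq_Afold (n : Int) :
    remov_nb_2 n = Afold n (PySem.Int.floordiv (n * (n + 1)) 2) := rfl

lemma remov_nb_2_alt_eq (n : Int) (h : ¬ n < 1) : remov_nb_2_alt n =
    PySem.List.sorted
      (pvLoop n (PySem.Int.floordiv (n * (n + 1)) 2 + 1) 1 (le_refl 1) PySem.Set.empty)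
      (fun p => p.1) false := by
  unfold remov_nb_2_alt
  rw [if_neg h]

lemma Afold_eq_filter (n S : Int) :
    Afold n S = ((PySem.List.pyRange 1 (n + 1) 1).filter
      (fun x => decide (PySem.Int.floordiv (S - x) (x + 1) ≤ n ∧
        x * PySem.Int.floordiv (S - x) (x + 1) = S - x - PySem.Int.floordiv (S - x) (x + 1)))).map
      (fun x => (x, PySem.Int.floordiv (S - x) (x + 1))) := by
  show (PySem.List.pyRange 1 (n + 1) 1).foldl (fun result x =>
      if PySem.Int.floordiv (S - x) (x + 1) ≤ n ∧
          x * PySem.Int.floordiv (S - x) (x + 1) = S - x - PySem.Int.floordiv (S - x) (x + 1)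
        then result ++ [(x, PySem.Int.floordiv (S - x) (x + 1))] else result) [] = _
  rw [PySem.List.foldl_append_ite]
  exact List.nil_append _

lemma Afold_pairwise (n S : Int) : (Afold n S).Pairwise (fun a b => a.1 < b.1) := by
  rw [Afold_eq_filter]
  exact List.Pairwise.map _ (fun a b h => h)
    (List.Pairwise.filter _ (PySem.List.pairwise_lt_pyRange_one 1 (n + 1)))

lemma Afold_nodup (n S : Int) : (Afold n S).Nodup :=
  (Afold_pairwise n S).imp (fun h => by rintro rfl; exact lt_irrefl _ h)

-- y = (S - x) // (x + 1) equals T/(x+1) - 1 with T = S + 1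
lemma yval (S x : Int) (hx : 1 ≤ x) :
    PySem.Int.floordiv (S - x) (x + 1) = (S + 1) / (x + 1) - 1 := by
  rw [PySem.Int.floordiv_eq_ediv_of_pos (by omega)]
  rw [show S - x = (S + 1) + (-1) * (x + 1) by ring,
      Int.add_mul_ediv_right _ _ (by omega : x + 1 ≠ 0)]
  ring

-- the product equation holds iff x+1 divides T = S + 1
lemma cond_iff (S x : Int) (_hx : 1 ≤ x) :
    (x * ((S + 1) / (x + 1) - 1) = S - x - ((S + 1) / (x + 1) - 1)) ↔ (x + 1) ∣ (S + 1) := by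
  have hexp : (x + 1) * ((S + 1) / (x + 1)) =
      x * ((S + 1) / (x + 1)) + ((S + 1) / (x + 1)) := by ring
  constructor
  · intro h
    refine ⟨(S + 1) / (x + 1), ?_⟩
    linarith
  · intro hdvd
    have hc := Int.ediv_mul_cancel hdvd
    have hexp2 : (S + 1) / (x + 1) * (x + 1) =
        x * ((S + 1) / (x + 1)) + ((S + 1) / (x + 1)) := by ring
    linarith [hc, hexp2]

lemma Afold_mem (n S : Int) (p : Int × Int) :
    p ∈ Afold n S ↔ ∃ x, 1 ≤ x ∧ x < n + 1 ∧ (x + 1) ∣ (S + 1) ∧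
      (S + 1) / (x + 1) - 1 ≤ n ∧ p = (x, (S + 1) / (x + 1) - 1) := by
  rw [Afold_eq_filter]
  simp only [List.mem_map, List.mem_filter, PySem.List.mem_pyRange_one, decide_eq_true_eq]
  constructor
  · rintro ⟨x, ⟨⟨hx1, hx2⟩, hy, hcond⟩, rfl⟩
    rw [yval S x hx1] at hy hcond ⊢
    exact ⟨x, hx1, hx2, (cond_iff S x hx1).mp hcond, hy, rfl⟩
  · rintro ⟨x, hx1, hx2, hdvd, hy, rfl⟩
    refine ⟨x, ⟨⟨hx1, hx2⟩, ?_, ?_⟩, ?_⟩ <;> rw [yval S x hx1]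
    · exact hy
    · exact (cond_iff S x hx1).mpr hdvd

-- the test of Source B's inner branch, with Int ediv
def okC (n T f : Int) : Prop := 1 ≤ f - 1 ∧ f - 1 ≤ n ∧ T / f - 1 ≤ n

lemma step_mem (n total f : Int) (hf : 0 < f) (s : PySem.Set (Int × Int)) (p : Int × Int) :
    p ∈ pvStep n total s f ↔ p ∈ s ∨ (okC n total f ∧ p = (f - 1, total / f - 1)) := by
  simp only [pvStep, okC]
  rw [PySem.Int.floordiv_eq_ediv_of_pos hf]
  split_ifs with h
  · rw [PySem.Set.mem_add]; tauto
  · tauto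

lemma step_nodup (n total f : Int) (s : PySem.Set (Int × Int)) (hs : s.Nodup) :
    (pvStep n total s f).Nodup := by
  simp only [pvStep]
  split_ifs with h
  · exact PySem.Set.nodup_add _ _ hs
  · exact hs

lemma loop_nodup (n total : Int) :
    ∀ (k : Nat) (d : Int) (hd : 1 ≤ d) (s : PySem.Set (Int × Int)),
      (total + 1 - d).toNat ≤ k → s.Nodup → (pvLoop n total d hd s).Nodup := by
  intro k
  induction k with
  | zero =>
    intro d hd s hk hs
    have hd' : total + 1 ≤ d := by omega
    have hgt : ¬ d * d ≤ total := by intro h; nlinarith [sq_nonneg (d - 1), sq_nonneg d]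
    rw [pvLoop, dif_neg hgt]; exact hs
  | succ k ih =>
    intro d hd s hk hs
    rw [pvLoop]
    by_cases h : d * d ≤ total
    · rw [dif_pos h]
      have hdle : d ≤ total := by nlinarith [sq_nonneg (d - 1)]
      refine ih (d + 1) (by omega) _ (by omega) ?_
      split_ifs with hm
      · simp only [List.foldl_cons, List.foldl_nil]
        exact step_nodup _ _ _ _ (step_nodup _ _ _ _ hs)
      · exact hs
    · rw [dif_neg h]; exact hs

lemma loop_mem (n total : Int) (p : Int × Int) :
    ∀ (k : Nat) (d : Int) (hd : 1 ≤ d) (s : PySem.Set (Int × Int)),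
      (total + 1 - d).toNat ≤ k →
      (p ∈ pvLoop n total d hd s ↔ p ∈ s ∨ ∃ e, d ≤ e ∧ e * e ≤ total ∧ e ∣ total ∧
        ((okC n total e ∧ p = (e - 1, total / e - 1)) ∨
         (okC n total (total / e) ∧ p = (total / e - 1, total / (total / e) - 1)))) := by
  intro k
  induction k with
  | zero =>
    intro d hd s hk
    have hd' : total + 1 ≤ d := by omega
    have hgt : ¬ d * d ≤ total := by intro h; nlinarith [sq_nonneg (d - 1), sq_nonneg d]
    rw [pvLoop, dif_neg hgt]
    constructor
    · exact Or.inl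
    · rintro (hp | ⟨e, hde, hee, -, -⟩)
      · exact hp
      · exfalso
        have he1 : 1 ≤ e := by omega
        nlinarith [sq_nonneg (e - 1), sq_nonneg e]
  | succ k ih =>
    intro d hd s hk
    rw [pvLoop]
    by_cases h : d * d ≤ total
    · rw [dif_pos h]
      have hdle : d ≤ total := by nlinarith [sq_nonneg (d - 1)]
      rw [ih (d + 1) (by omega) _ (by omega)]
      by_cases hm : PySem.Int.mod total d = 0
      · have hdvd : d ∣ total := (PySem.Int.mod_eq_zero_iff_dvd total d).mp hm
        have hfd : PySem.Int.floordiv total d = total / d :=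
          PySem.Int.floordiv_eq_ediv_of_pos (by omega)
        have hcpos : 0 < total / d := by
          rcases hdvd with ⟨c, hc⟩
          have hc1 : total / d = c := by rw [hc]; exact Int.mul_ediv_cancel_left _ (by omega)
          rw [hc1]; nlinarith
        rw [if_pos hm]
        simp only [List.foldl_cons, List.foldl_nil, hfd]
        rw [step_mem n total (total / d) hcpos, step_mem n total d (by omega)]
        have hdvd' : d ∣ total := (PySem.Int.mod_eq_zero_iff_dvd total d).mp hm
        constructor
        · rintro (((hp | hB1) | hB2) | ⟨e, he1, he2, he3, he4⟩)
          · exact Or.inl hp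
          · exact Or.inr ⟨d, le_refl d, h, hdvd', Or.inl hB1⟩
          · exact Or.inr ⟨d, le_refl d, h, hdvd', Or.inr hB2⟩
          · exact Or.inr ⟨e, by omega, he2, he3, he4⟩
        · rintro (hp | ⟨e, he1, he2, he3, he4⟩)
          · exact Or.inl (Or.inl (Or.inl hp))
          · by_cases hed : e = d
            · subst hed
              rcases he4 with h4 | h4
              · exact Or.inl (Or.inl (Or.inr h4))
              · exact Or.inl (Or.inr h4)
            · exact Or.inr ⟨e, by omega, he2, he3, he4⟩
      · rw [if_neg hm]
        constructor
        · rintro (hp | ⟨e, he1, he2, he3, he4⟩)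
          · exact Or.inl hp
          · exact Or.inr ⟨e, by omega, he2, he3, he4⟩
        · rintro (hp | ⟨e, he1, he2, he3, he4⟩)
          · exact Or.inl hp
          · have hed : e ≠ d := by
              rintro rfl
              exact hm ((PySem.Int.mod_eq_zero_iff_dvd total e).mpr he3)
            exact Or.inr ⟨e, by omega, he2, he3, he4⟩
    · rw [dif_neg h]
      constructor
      · exact Or.inl
      · rintro (hp | ⟨e, he1, he2, -, -⟩)
        · exact hp
        · exfalso
          nlinarith [mul_nonneg (by omega : (0:Int) ≤ e - d) (by omega : (0:Int) ≤ e + d)]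

-- divisor pairing: the loop's candidates are exactly A's solutions
lemma key_iff (n T : Int) (hT : 1 ≤ T) (p : Int × Int) :
    (∃ e, 1 ≤ e ∧ e * e ≤ T ∧ e ∣ T ∧
      ((okC n T e ∧ p = (e - 1, T / e - 1)) ∨
       (okC n T (T / e) ∧ p = (T / e - 1, T / (T / e) - 1)))) ↔
    (∃ x, 1 ≤ x ∧ x < n + 1 ∧ (x + 1) ∣ T ∧ T / (x + 1) - 1 ≤ n ∧
      p = (x, T / (x + 1) - 1)) := by
  simp only [okC]
  constructor
  · rintro ⟨e, he1, -, hdvd, hbr⟩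
    obtain ⟨c, hc⟩ := hdvd
    have hce : T / e = c := by rw [hc]; exact Int.mul_ediv_cancel_left _ (by omega)
    have hc1 : 1 ≤ c := by nlinarith
    rcases hbr with ⟨⟨h1, h2, h3⟩, rfl⟩ | ⟨⟨h1, h2, h3⟩, rfl⟩
    · refine ⟨e - 1, h1, by omega, ?_, ?_, ?_⟩ <;> rw [show e - 1 + 1 = e by ring]
      · exact ⟨c, hc⟩
      · exact h3
    · rw [hce] at h1 h2 h3 ⊢
      have hTc : T / c = e := by rw [hc, mul_comm]; exact Int.mul_ediv_cancel_left _ (by omega)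
      rw [hTc] at h3 ⊢
      refine ⟨c - 1, h1, by omega, ?_, ?_, ?_⟩ <;> rw [show c - 1 + 1 = c by ring]
      · exact ⟨e, by rw [hc]; ring⟩
      · rw [hTc]; exact h3
      · rw [hTc]
  · rintro ⟨x, hx1, hx2, hdvd, hy, rfl⟩
    obtain ⟨c, hc⟩ := hdvd
    have hfx : T / (x + 1) = c := by rw [hc]; exact Int.mul_ediv_cancel_left _ (by omega)
    have hc1 : 1 ≤ c := by nlinarith
    by_cases hcase : (x + 1) * (x + 1) ≤ T
    · refine ⟨x + 1, by omega, hcase, ⟨c, hc⟩,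
        Or.inl ⟨⟨by omega, by omega, ?_⟩, ?_⟩⟩
      · exact hy
      · rw [show x + 1 - 1 = x by ring]
    · rw [not_le] at hcase
      have h1 : (x + 1) * c < (x + 1) * (x + 1) := by rw [← hc]; exact hcase
      have hclt : c < x + 1 := lt_of_mul_lt_mul_left h1 (by omega)
      have hcc : c * c ≤ T := by nlinarith
      have hTc : T / c = x + 1 := by rw [hc, mul_comm]; exact Int.mul_ediv_cancel_left _ (by omega)
      refine ⟨c, hc1, hcc, ⟨x + 1, by rw [hc]; ring⟩, Or.inr ⟨?_, ?_⟩⟩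
      · rw [hTc]
        exact ⟨by omega, by omega, hy⟩
      · rw [hTc, show x + 1 - 1 = x by ring]

lemma main_eq (n : Int) : remov_nb_2 n = remov_nb_2_alt n := by
  by_cases hn : n < 1
  · have hA : remov_nb_2 n = [] := by
      rw [remov_nb_2_eq_Afold, Afold_eq_filter, PySem.List.pyRange_one_eq_nil (by omega)]
      rfl
    rw [hA]
    unfold remov_nb_2_alt
    rw [if_pos hn]
  have h2 : 2 * PySem.Int.floordiv (n * (n + 1)) 2 = n * (n + 1) := by
    rw [PySem.Int.floordiv_eq_ediv_of_pos (by norm_num), mul_comm]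
    exact Int.ediv_mul_cancel (Int.even_mul_succ_self n).two_dvd
  have h4 : 0 ≤ 4 * (n * (n + 1)) + 1 := by nlinarith [sq_nonneg (2 * n + 1)]
  have h5 : 0 ≤ 8 * PySem.Int.floordiv (n * (n + 1)) 2 + 1 := by linarith
  rw [remov_nb_2_eq_Afold, remov_nb_2_alt_eq n hn]
  clear h2 h4
  generalize hSg : PySem.Int.floordiv (n * (n + 1)) 2 = S at h5 ⊢
  have h0 : 0 ≤ S := by omega
  have hT : 1 ≤ S + 1 := by omega
  symm
  apply PySem.List.sorted_eq_of_perm_of_pairwise_lt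
  · rw [List.perm_ext_iff_of_nodup (Afold_nodup n S)
      (loop_nodup n (S + 1) (S + 1).toNat 1 (le_refl 1) PySem.Set.empty (by omega)
        List.nodup_nil)]
    intro p
    rw [Afold_mem, loop_mem n (S + 1) p (S + 1).toNat 1 (le_refl 1) PySem.Set.empty (by omega)]
    simp only [PySem.Set.empty, List.not_mem_nil, false_or]
    rw [key_iff n (S + 1) hT p]
  · exact Afold_pairwise n S

-- ===== VERDICT (by name: the statement is the Claim_ definition above) =====
theorem remov_nb_2_spec : Claim_equal_remov_nb_2 := by
  intro n _
  show remov_nb_2 n = remov_nb_2_alt n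
  exact main_eq n
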